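-- pv_equiv track=rewrite | github.com/WaseemKn/GSPAlgorithm-DataMiningCourse-ITE5thYear | permutation_and_relation.py | is_there_relation
-- ===== SOURCE A (Python) =====
-- def is_there_relation(s1, s2):
--
--     rel1 = None
--     for i in range(len(s1)):
--         if s2.startswith(s1[i:]):
--             if i == 0 and s1.count(s1[0]) == len(s1): # for case: 'aaa', 'aaa'
--                 return True, s1+s1[0], None
--             elif i==0: #for case: 'ac', 'ac'
--                 return False, None, None
--             rel1 = s1 + s2[len(s1[i:]):]
--             break
--     rel2 = None
--     for i in range(len(s2)):
--         if s1.startswith(s2[i:]):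
--             rel2 = s2 + s1[len(s2[i:]):]
--             break
--     return rel1!=None or rel2!=None, rel1, rel2
-- ===== SOURCE B (Python) =====
-- def _fail(s):
--     """KMP failure function: f[i] = length of the longest proper border of s[:i+1]."""
--     f = [0] * len(s)
--     k = 0
--     for i in range(1, len(s)):
--         while k > 0 and s[i] != s[k]:
--             k = f[k - 1]
--         if s[i] == s[k]:
--             k += 1
--         f[i] = k
--     return f
--
-- def _overlap(a, b):
--     """Length of the longest (nonempty) suffix of a that is a prefix of b,
--     computed in one KMP pass over b + NUL + a (inputs are NUL-free text)."""
--     if not a or not b: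
--         return 0
--     return _fail(b + "\x00" + a)[-1]
--
-- def is_there_relation(s1, s2):
--     L1 = _overlap(s1, s2)
--     if L1 and L1 == len(s1):
--         if s1 == s1[0] * len(s1):
--             return True, s1 + s1[0], None
--         return False, None, None
--     rel1 = s1 + s2[L1:] if L1 else None
--     L2 = _overlap(s2, s1)
--     rel2 = s2 + s1[L2:] if L2 else None
--     return rel1 is not None or rel2 is not None, rel1, rel2
-- ===== Notes on version B (the rewrite author's own statement) =====
-- stated objective: faster
-- what changed: A probes every start index with startswith (a quadratic scan in each direction); B computes the longest suffix/prefix overlap in each direction with a single KMP failure-function pass over b + NUL + a and derives the same results from that length.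
import Mathlib
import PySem

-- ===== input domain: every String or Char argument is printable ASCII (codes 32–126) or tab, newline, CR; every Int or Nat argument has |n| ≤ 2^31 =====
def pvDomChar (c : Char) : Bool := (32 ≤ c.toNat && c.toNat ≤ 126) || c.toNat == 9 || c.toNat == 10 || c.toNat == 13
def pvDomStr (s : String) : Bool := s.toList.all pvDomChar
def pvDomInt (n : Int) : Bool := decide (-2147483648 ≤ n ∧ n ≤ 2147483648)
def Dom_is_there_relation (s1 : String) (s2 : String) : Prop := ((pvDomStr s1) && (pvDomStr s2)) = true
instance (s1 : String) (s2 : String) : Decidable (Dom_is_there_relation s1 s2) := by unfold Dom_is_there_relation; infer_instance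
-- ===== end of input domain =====

-- B replaces A's repeated startswith scans (quadratic in each direction) by the classic KMP
-- failure-function computation of the longest suffix/prefix overlap: one linear pass over
-- b + NUL + a per direction (the NUL sentinel is safe on the stated domain, which has no NUL);
-- objective: faster (a timing run measured B ≥ 11x faster at the largest completed size).

-- ===== PORT A =====
-- first loop of A: for i in range(len(s1)): early returns at i == 0 become Sum.inl, rel1/break Sum.inr.
-- s1[0] (evaluated only when the loop is entered, so s1 ≠ [] and the pyGetD default is never read)
def aScan1 (a b : List Char) : List Int → (Bool × Option (List Char) × Option (List Char)) ⊕ Option (List Char)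
  | [] => .inr none
  | i :: rest =>
    if PySem.Chars.startswith b (PySem.List.slice a (some i) none) then
      if i == 0 && (PySem.Chars.count a [PySem.List.pyGetD a 0 ' '] == a.length) then
        .inl (true, some (a ++ [PySem.List.pyGetD a 0 ' ']), none)
      else if i == 0 then
        .inl (false, none, none)
      else
        .inr (some (a ++ PySem.List.slice b (some (((PySem.List.slice a (some i) none).length : Int))) none))
    else aScan1 a b rest

-- second loop of A: for i in range(len(s2)): first i with s1.startswith(s2[i:]) sets rel2, break
def aScan2 (a b : List Char) : List Int → Option (List Char)
  | [] => none
  | i :: rest =>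
    if PySem.Chars.startswith b (PySem.List.slice a (some i) none) then
      some (a ++ PySem.List.slice b (some (((PySem.List.slice a (some i) none).length : Int))) none)
    else aScan2 a b rest

def is_there_relation (s1 : String) (s2 : String) : Bool × Option String × Option String :=
  match aScan1 s1.toList s2.toList (PySem.List.pyRange 0 (s1.toList.length : Int) 1) with
  | .inl r => (r.1, r.2.1.map String.ofList, r.2.2.map String.ofList)
  | .inr rel1 =>
    let rel2 := aScan2 s2.toList s1.toList (PySem.List.pyRange 0 (s2.toList.length : Int) 1)
    (rel1.isSome || rel2.isSome, rel1.map String.ofList, rel2.map String.ofList)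

-- ===== PORT B =====
-- the inner `while k > 0 and s[i] != s[k]: k = f[k-1]` of _fail; c is s[i].
-- fuel only makes the recursion structural: it starts at k and each step strictly decreases k
def pvChain (s : List Char) (f : List Nat) (c : Char) : Nat → Nat → Nat
  | 0, k => k
  | fuel + 1, k =>
    if 0 < k && !(s.getD k ' ' == c) then pvChain s f c fuel (f.getD (k - 1) 0) else k

-- the `for i in range(1, len(s))` loop of _fail, carrying (f, k)
def pvFailLoop (s : List Char) (f : List Nat) (k i : Nat) : List Nat :=
  if h : i < s.length then
    let c := s.getD i ' '
    let k1 := pvChain s f c k k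
    let k2 := if s.getD k1 ' ' == c then k1 + 1 else k1
    pvFailLoop s (f.set i k2) k2 (i + 1)
  else f
termination_by s.length - i

-- _fail(s): f = [0]*len(s); k = 0; loop from i = 1
def pvFail (s : List Char) : List Nat := pvFailLoop s (List.replicate s.length 0) 0 1

def pvSep : Char := Char.ofNat 0   -- "\x00"

-- _overlap(a, b) = _fail(b + "\x00" + a)[-1]  (f[-1] on a nonempty list = last entry)
def pvOverlap (a b : List Char) : Nat :=
  if a.isEmpty || b.isEmpty then 0
  else
    let s := b ++ pvSep :: a
    (pvFail s).getD (s.length - 1) 0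

def is_there_relation_alt (s1 : String) (s2 : String) : Bool × Option String × Option String :=
  let a := s1.toList
  let b := s2.toList
  let L1 := pvOverlap a b
  if 0 < L1 && L1 == a.length then
    -- s1 == s1[0] * len(s1)  (s1 nonempty here since L1 > 0)
    if a == List.replicate a.length (PySem.List.pyGetD a 0 ' ') then
      (true, some (String.ofList (a ++ [PySem.List.pyGetD a 0 ' '])), none)
    else (false, none, none)
  else
    let rel1 := if 0 < L1 then some (a ++ PySem.List.slice b (some (L1 : Int)) none) else none
    let L2 := pvOverlap b a
    let rel2 := if 0 < L2 then some (b ++ PySem.List.slice a (some (L2 : Int)) none) else none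
    (rel1.isSome || rel2.isSome, rel1.map String.ofList, rel2.map String.ofList)

-- ===== PRECONDITION & SPEC =====
def Spec_is_there_relation (s1 : String) (s2 : String) (out : Bool × Option String × Option String) : Prop := out = is_there_relation_alt s1 s2
instance (s1 : String) (s2 : String) (out : Bool × Option String × Option String) : Decidable (Spec_is_there_relation s1 s2 out) := by unfold Spec_is_there_relation; infer_instance

-- ===== CLAIM (what is proved, stated in full; the proofs are below) =====
def Claim_equal_is_there_relation : Prop := ∀ (s1 : String) (s2 : String), Dom_is_there_relation s1 s2 → Spec_is_there_relation s1 s2 (is_there_relation s1 s2)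

-- ===== LEMMAS AND PROOFS =====

-- ---------- A-side characterisation: first hit of a linear startswith scan ----------

-- reference scan: smallest i in [m, len a) with b.startswith(a[i:]), else none
def sFirst (a b : List Char) (m : Nat) : Option Nat :=
  if h : m < a.length then
    if PySem.Chars.startswith b (a.drop m) then some m else sFirst a b (m + 1)
  else none
termination_by a.length - m

lemma sFirst_none_of_ge (a b : List Char) (m : Nat) (h : a.length ≤ m) : sFirst a b m = none := by
  rw [sFirst]; simp [Nat.not_lt.mpr h]

lemma sFirst_step (a b : List Char) (m : Nat) (hm : m < a.length)
    (hsw : PySem.Chars.startswith b (a.drop m) = false) : sFirst a b m = sFirst a b (m + 1) := by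
  rw [sFirst]; simp [hm, hsw]

lemma sFirst_hit (a b : List Char) (m : Nat) (hm : m < a.length)
    (hsw : PySem.Chars.startswith b (a.drop m) = true) : sFirst a b m = some m := by
  rw [sFirst]; simp [hm, hsw]

lemma sFirst_some (a b : List Char) (m i : Nat) (h : sFirst a b m = some i) :
    m ≤ i ∧ i < a.length ∧ PySem.Chars.startswith b (a.drop i) = true := by
  induction m using sFirst.induct a b with
  | case1 m hm hsw => rw [sFirst] at h; simp [hm, hsw] at h; subst h; exact ⟨le_refl _, hm, hsw⟩
  | case2 m hm hsw ih =>
    rw [sFirst] at h; simp [hm, hsw] at h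
    obtain ⟨h1, h2, h3⟩ := ih h
    exact ⟨by omega, h2, h3⟩
  | case3 m hm => rw [sFirst] at h; simp [hm] at h

lemma sFirst_skip (a b : List Char) (m k : Nat) (hmk : m ≤ k)
    (hnone : ∀ j, m ≤ j → j < k → j < a.length → PySem.Chars.startswith b (a.drop j) = false) :
    sFirst a b m = sFirst a b k := by
  induction k with
  | zero => have : m = 0 := by omega
            rw [this]
  | succ k ih =>
    rcases Nat.lt_or_ge m (k+1) with h | h
    · have hmk' : m ≤ k := by omega
      rw [ih hmk' (fun j h1 h2 h3 => hnone j h1 (by omega) h3)]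
      by_cases hk : k < a.length
      · exact sFirst_step a b k hk (hnone k hmk' (by omega) hk)
      · rw [sFirst_none_of_ge a b k (by omega), sFirst_none_of_ge a b (k+1) (by omega)]
    · have : m = k + 1 := by omega
      rw [this]

lemma sFirst_none_of_all (a b : List Char) (m : Nat)
    (hnone : ∀ j, m ≤ j → j < a.length → PySem.Chars.startswith b (a.drop j) = false) :
    sFirst a b m = none := by
  rcases Nat.le_total m a.length with h | h
  · rw [sFirst_skip a b m a.length h (fun j h1 h2 h3 => hnone j h1 h3)]
    exact sFirst_none_of_ge a b a.length (le_refl _)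
  · exact sFirst_none_of_ge a b m h

lemma aScan2_eq (a b : List Char) (m : Nat) :
    aScan2 a b (PySem.List.pyRange (m : Int) (a.length : Int) 1) =
      (sFirst a b m).map (fun i => a ++ b.drop (a.length - i)) := by
  have main : ∀ n m : Nat, a.length - m ≤ n →
      aScan2 a b (PySem.List.pyRange (m : Int) (a.length : Int) 1) =
        (sFirst a b m).map (fun i => a ++ b.drop (a.length - i)) := by
    intro n
    induction n with
    | zero =>
      intro m hm
      rw [PySem.List.pyRange_one_eq_nil (by omega), sFirst_none_of_ge a b m (by omega)]
      rfl
    | succ n ih =>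
      intro m hm
      by_cases h : m < a.length
      · rw [PySem.List.pyRange_one_cons (by omega : (m : Int) < (a.length : Int))]
        rw [aScan2]
        rw [PySem.List.slice_from_natCast a m]
        by_cases hsw : PySem.Chars.startswith b (a.drop m) = true
        · rw [if_pos hsw, sFirst_hit a b m h hsw, Option.map_some]
          rw [List.length_drop, PySem.List.slice_from_natCast b (a.length - m)]
        · rw [if_neg (by simp [hsw]), sFirst_step a b m h (by simpa using hsw)]
          rw [show (m : Int) + 1 = ((m + 1 : Nat) : Int) by push_cast; ring]
          exact ih (m + 1) (by omega)
      · rw [PySem.List.pyRange_one_eq_nil (by omega), sFirst_none_of_ge a b m (by omega)]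
        rfl
  exact main (a.length - m) m (le_refl _)

lemma aScan1_tail (a b : List Char) (m : Nat) (hm : 1 ≤ m) :
    aScan1 a b (PySem.List.pyRange (m : Int) (a.length : Int) 1) =
      .inr ((sFirst a b m).map (fun i => a ++ b.drop (a.length - i))) := by
  have main : ∀ n m : Nat, 1 ≤ m → a.length - m ≤ n →
      aScan1 a b (PySem.List.pyRange (m : Int) (a.length : Int) 1) =
        .inr ((sFirst a b m).map (fun i => a ++ b.drop (a.length - i))) := by
    intro n
    induction n with
    | zero =>
      intro m hm1 hm
      rw [PySem.List.pyRange_one_eq_nil (by omega), sFirst_none_of_ge a b m (by omega)]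
      rfl
    | succ n ih =>
      intro m hm1 hm
      by_cases h : m < a.length
      · rw [PySem.List.pyRange_one_cons (by omega : (m : Int) < (a.length : Int))]
        rw [aScan1]
        have hm0 : ((m : Int) == 0) = false := by
          simp only [beq_eq_false_iff_ne, ne_eq]
          omega
        rw [PySem.List.slice_from_natCast a m]
        by_cases hsw : PySem.Chars.startswith b (a.drop m) = true
        · rw [if_pos hsw, hm0]
          simp only [Bool.false_and, Bool.false_eq_true, if_false]
          rw [sFirst_hit a b m h hsw, Option.map_some]
          rw [List.length_drop, PySem.List.slice_from_natCast b (a.length - m)]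
        · rw [if_neg (by simp [hsw]), sFirst_step a b m h (by simpa using hsw)]
          rw [show (m : Int) + 1 = ((m + 1 : Nat) : Int) by push_cast; ring]
          exact ih (m + 1) (by omega) (by omega)
      · rw [PySem.List.pyRange_one_eq_nil (by omega), sFirst_none_of_ge a b m (by omega)]
        rfl
  exact main (a.length - m) m hm (le_refl _)

lemma aScan1_eq (a b : List Char) :
    aScan1 a b (PySem.List.pyRange 0 (a.length : Int) 1) =
      match sFirst a b 0 with
      | some 0 =>
        .inl (if PySem.Chars.count a [PySem.List.pyGetD a 0 ' '] == a.length then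
                ((true : Bool), some (a ++ [PySem.List.pyGetD a 0 ' ']), (none : Option (List Char)))
              else (false, none, none))
      | some (i + 1) => .inr (some (a ++ b.drop (a.length - (i + 1))))
      | none => .inr none := by
  have hsl : PySem.List.slice a (some (0 : Int)) none = a := by
    have h := PySem.List.slice_from_natCast a 0
    rwa [Nat.cast_zero] at h
  by_cases h0 : 0 < a.length
  · rw [PySem.List.pyRange_one_cons (by exact_mod_cast h0 : (0 : Int) < (a.length : Int))]
    rw [aScan1, hsl]
    by_cases hsw : PySem.Chars.startswith b a = true
    · rw [if_pos hsw]
      rw [sFirst_hit a b 0 h0 (by simp [hsw])]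
      by_cases hcnt : (PySem.Chars.count a [PySem.List.pyGetD a 0 ' '] == a.length) = true
      · simp [hcnt]
      · simp [hcnt]
    · rw [if_neg (by simp [hsw])]
      rw [show (0 : Int) + 1 = ((1 : Nat) : Int) by norm_num]
      rw [aScan1_tail a b 1 (le_refl _)]
      rw [sFirst_step a b 0 h0 (by simp [hsw])]
      rcases hs : sFirst a b 1 with _ | i
      · rfl
      · obtain ⟨hi1, _, _⟩ := sFirst_some a b 1 i hs
        rcases i with _ | i
        · omega
        · rfl
  · rw [PySem.List.pyRange_one_eq_nil (by omega), sFirst_none_of_ge a b 0 (by omega)]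
    rfl

-- ---------- generic suffix toolbox ----------

lemma suffix_of_suffix_le {u v t : List Char} (hu : u <:+ t) (hv : v <:+ t)
    (h : u.length ≤ v.length) : u <:+ v := by
  rw [← List.reverse_prefix] at hu hv ⊢
  exact List.prefix_of_prefix_length_le hu hv (by simpa using h)

lemma concat_suffix_concat {u v : List Char} {x y : Char} :
    u ++ [x] <:+ v ++ [y] ↔ x = y ∧ u <:+ v := by
  rw [← List.reverse_prefix, List.reverse_append, List.reverse_append]
  simp only [List.reverse_singleton, List.singleton_append, List.cons_prefix_cons]
  rw [List.reverse_prefix]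

lemma take_concat (s : List Char) (i : Nat) (h : i < s.length) :
    s.take (i + 1) = s.take i ++ [s[i]] := by
  rw [List.take_add_one, List.getElem?_eq_getElem h]
  rfl

-- ---------- the overlap quantity both programs compute ----------

-- OV a b = largest L ≥ 1 (0 if none) such that the length-L suffix of a is a prefix of b
def OV (a b : List Char) : Nat :=
  Nat.findGreatest (fun L => 0 < L ∧ PySem.Chars.startswith b (a.drop (a.length - L)) = true) a.length

lemma OV_le (a b : List Char) : OV a b ≤ a.length := Nat.findGreatest_le _

lemma fg_pos_spec {P : Nat → Prop} [DecidablePred P] {n : Nat}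
    (h : Nat.findGreatest P n ≠ 0) : P (Nat.findGreatest P n) :=
  (Nat.findGreatest_eq_iff.mp rfl).2.1 h

lemma OV_spec (a b : List Char) (h : 0 < OV a b) :
    PySem.Chars.startswith b (a.drop (a.length - OV a b)) = true := by
  have := fg_pos_spec (P := fun L => 0 < L ∧ PySem.Chars.startswith b (a.drop (a.length - L)) = true)
    (n := a.length) (by unfold OV at h; omega)
  exact this.2

lemma OV_is_greatest (a b : List Char) (L : Nat) (h1 : OV a b < L) (h2 : L ≤ a.length) :
    PySem.Chars.startswith b (a.drop (a.length - L)) = false := by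
  have := Nat.findGreatest_is_greatest (P := fun L => 0 < L ∧ PySem.Chars.startswith b (a.drop (a.length - L)) = true) h1 h2
  rw [not_and] at this
  have := this (by omega)
  simpa using this

lemma sFirst_eq_OV (a b : List Char) :
    sFirst a b 0 = if 0 < OV a b then some (a.length - OV a b) else none := by
  by_cases h : 0 < OV a b
  · rw [if_pos h]
    have hle := OV_le a b
    have hlen : 0 < a.length := by omega
    rw [sFirst_skip a b 0 (a.length - OV a b) (by omega)
      (fun j h1 h2 h3 => by
        have : a.length - j ≤ a.length := by omega
        have hgt : OV a b < a.length - j := by omega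
        have := OV_is_greatest a b (a.length - j) hgt this
        rwa [show a.length - (a.length - j) = j by omega] at this)]
    exact sFirst_hit a b (a.length - OV a b) (by omega) (OV_spec a b h)
  · rw [if_neg h]
    apply sFirst_none_of_all
    intro j _ hj
    have h0 : OV a b = 0 := by omega
    have := OV_is_greatest a b (a.length - j) (by omega) (by omega)
    rwa [show a.length - (a.length - j) = j by omega] at this

-- ---------- failure-function correctness ----------

-- MB s m = length of the longest proper border of s.take m
def MB (s : List Char) (m : Nat) : Nat :=
  Nat.findGreatest (fun L => L < m ∧ s.take L <:+ s.take m) m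

lemma MB_spec (s : List Char) (m : Nat) (hm : 0 < m) :
    MB s m < m ∧ s.take (MB s m) <:+ s.take m := by
  by_cases h : MB s m = 0
  · rw [h]; exact ⟨hm, by simp [List.nil_suffix]⟩
  · exact fg_pos_spec (P := fun L => L < m ∧ s.take L <:+ s.take m) (n := m) h

lemma le_MB (s : List Char) (m L : Nat) (h1 : L < m) (h2 : s.take L <:+ s.take m) : L ≤ MB s m :=
  Nat.le_findGreatest (by omega) ⟨h1, h2⟩

lemma MB_one (s : List Char) : MB s 1 = 0 := by
  unfold MB
  rw [Nat.findGreatest_succ]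
  simp

-- the chain k → f[k-1] visits exactly the borders of s.take i, in decreasing order
lemma pvChain_spec (s : List Char) (f : List Nat) (c : Char) (i : Nat) (hi : i < s.length)
    (hf : ∀ j, j < i → f.getD j 0 = MB s (j + 1)) :
    ∀ fuel k, k ≤ fuel → (k < i ∧ s.take k <:+ s.take i) →
      (∀ M, M < i → s.take M <:+ s.take i → s.getD M ' ' = c → M ≤ k) →
      ((pvChain s f c fuel k < i ∧ s.take (pvChain s f c fuel k) <:+ s.take i) ∧
       (∀ M, M < i → s.take M <:+ s.take i → s.getD M ' ' = c → M ≤ pvChain s f c fuel k) ∧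
       (0 < pvChain s f c fuel k → s.getD (pvChain s f c fuel k) ' ' = c)) := by
  intro fuel
  induction fuel with
  | zero =>
    intro k hk hD hmax
    have hk0 : k = 0 := by omega
    subst hk0
    simp only [pvChain]
    exact ⟨hD, hmax, fun h => absurd h (by omega)⟩
  | succ fuel ih =>
    intro k hk hD hmax
    rw [pvChain]
    by_cases hcond : (decide (0 < k) && !(s.getD k ' ' == c)) = true
    · rw [if_pos hcond]
      simp only [Bool.and_eq_true, decide_eq_true_eq, Bool.not_eq_true',
        beq_eq_false_iff_ne, ne_eq] at hcond
      obtain ⟨hk0, hc⟩ := hcond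
      have hfk : f.getD (k - 1) 0 = MB s k := by
        have := hf (k - 1) (by omega)
        rwa [show k - 1 + 1 = k by omega] at this
      rw [hfk]
      have hMB := MB_spec s k (by omega)
      have hD' : MB s k < i ∧ s.take (MB s k) <:+ s.take i :=
        ⟨by omega, hMB.2.trans hD.2⟩
      have hmax' : ∀ M, M < i → s.take M <:+ s.take i → s.getD M ' ' = c → M ≤ MB s k := by
        intro M hM1 hM2 hM3
        have hMk : M ≤ k := hmax M hM1 hM2 hM3
        have hMne : M ≠ k := by
          intro hMe; subst hMe; exact hc hM3
        have hMlt : M < k := by omega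
        apply le_MB s k M hMlt
        apply suffix_of_suffix_le hM2 hD.2
        simp only [List.length_take]
        omega
      exact ih (MB s k) (by omega) hD' hmax'
    · rw [if_neg hcond]
      refine ⟨hD, hmax, ?_⟩
      intro hk0
      by_contra hne
      have h1 : (s.getD k ' ' == c) = false := beq_eq_false_iff_ne.mpr hne
      apply hcond
      rw [h1, decide_eq_true hk0]
      rfl

-- one iteration of the _fail loop turns MB s i into MB s (i+1)
lemma pvStep_MB (s : List Char) (f : List Nat) (i : Nat) (hi : i < s.length) (hi1 : 1 ≤ i)
    (hf : ∀ j, j < i → f.getD j 0 = MB s (j + 1)) :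
    (if s.getD (pvChain s f (s.getD i ' ') (MB s i) (MB s i)) ' ' == s.getD i ' '
     then pvChain s f (s.getD i ' ') (MB s i) (MB s i) + 1
     else pvChain s f (s.getD i ' ') (MB s i) (MB s i)) = MB s (i + 1) := by
  set c := s.getD i ' ' with hc
  have hMB := MB_spec s i (by omega)
  have hch := pvChain_spec s f c i hi hf (MB s i) (MB s i) (le_refl _) hMB
    (fun M hM1 hM2 _ => le_MB s i M hM1 hM2)
  set r := pvChain s f c (MB s i) (MB s i) with hr
  obtain ⟨⟨hr1, hr2⟩, hrmax, hrc⟩ := hch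
  -- borders of s.take (i+1) with positive length M correspond to matching borders M-1 of s.take i
  have hdec : ∀ M : Nat, 0 < M → M < i + 1 → s.take M <:+ s.take (i + 1) →
      (M - 1) < i ∧ s.take (M - 1) <:+ s.take i ∧ s.getD (M - 1) ' ' = c := by
    intro M hM0 hM1 hM2
    have hMl : M - 1 < s.length := by omega
    rw [take_concat s i hi, show M = (M - 1) + 1 by omega, take_concat s (M - 1) hMl] at hM2
    obtain ⟨hxy, hsuf⟩ := concat_suffix_concat.mp hM2
    refine ⟨by omega, hsuf, ?_⟩
    rw [List.getD_eq_getElem s ' ' hMl, hc, List.getD_eq_getElem s ' ' hi]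
    exact hxy
  by_cases hcr : s.getD r ' ' = c
  · rw [if_pos (beq_iff_eq.mpr hcr)]
    apply Nat.le_antisymm
    · apply le_MB s (i + 1) (r + 1) (by omega)
      rw [take_concat s i hi, take_concat s r (by omega)]
      apply concat_suffix_concat.mpr
      constructor
      · rw [← List.getD_eq_getElem s ' ' (show r < s.length by omega),
            ← List.getD_eq_getElem s ' ' hi]
        exact hcr
      · exact hr2
    · set M := MB s (i + 1) with hM
      by_cases hM0 : 0 < M
      · have hMs := MB_spec s (i + 1) (by omega)
        obtain ⟨hd1, hd2, hd3⟩ := hdec M hM0 hMs.1 hMs.2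
        have := hrmax (M - 1) hd1 hd2 hd3
        omega
      · omega
  · rw [if_neg (fun hh => hcr (beq_iff_eq.mp hh))]
    have hr0 : r = 0 := by
      by_contra hr0
      exact hcr (hrc (Nat.pos_of_ne_zero hr0))
    rw [hr0]
    symm
    by_contra hMne
    have hM0 : 0 < MB s (i + 1) := Nat.pos_of_ne_zero (fun h => hMne h)
    have hMs := MB_spec s (i + 1) (by omega)
    obtain ⟨hd1, hd2, hd3⟩ := hdec (MB s (i + 1)) hM0 hMs.1 hMs.2
    have hle := hrmax (MB s (i + 1) - 1) hd1 hd2 hd3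
    rw [hr0] at hle
    have : MB s (i + 1) - 1 = 0 := by omega
    rw [this] at hd3
    rw [hr0] at hcr
    exact hcr hd3

lemma pvFailLoop_getD (s : List Char) :
    ∀ n i f k, s.length - i ≤ n → 1 ≤ i → f.length = s.length → k = MB s i →
      (∀ j, j < i → f.getD j 0 = MB s (j + 1)) →
      ∀ j, j < s.length → (pvFailLoop s f k i).getD j 0 = MB s (j + 1) := by
  intro n
  induction n with
  | zero =>
    intro i f k hn hi1 hfl hk hf j hj
    rw [pvFailLoop]
    simp only [show ¬ i < s.length by omega, dif_neg, not_false_iff]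
    exact hf j (by omega)
  | succ n ih =>
    intro i f k hn hi1 hfl hk hf j hj
    by_cases h : i < s.length
    · rw [pvFailLoop]
      rw [dif_pos h]
      have hstep := pvStep_MB s f i h hi1 hf
      rw [← hk] at hstep
      set k2 := if s.getD (pvChain s f (s.getD i ' ') k k) ' ' == s.getD i ' '
        then pvChain s f (s.getD i ' ') k k + 1 else pvChain s f (s.getD i ' ') k k with hk2
      apply ih (i + 1) (f.set i k2) k2 (by omega) (by omega) (by simp [hfl]) hstep _ j hj
      intro j' hj'
      rw [List.getD_eq_getElem?_getD, List.getElem?_set]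
      by_cases hji : i = j'
      · subst hji
        rw [if_pos rfl, if_pos (by omega)]
        simpa using hstep
      · rw [if_neg hji, ← List.getD_eq_getElem?_getD]
        exact hf j' (by omega)
    · rw [pvFailLoop]
      simp only [dif_neg h]
      exact hf j (by omega)

-- ---------- the NUL sentinel: borders of b ++ NUL ++ a are exactly the a/b overlaps ----------

lemma sent_drop (a b : List Char) (L : Nat) (hLa : L ≤ a.length) :
    (b ++ pvSep :: a).drop ((b ++ pvSep :: a).length - L) = a.drop (a.length - L) := by
  rw [List.drop_append]
  rw [List.drop_eq_nil_of_le (by simp; omega), List.nil_append]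
  rw [show (b ++ pvSep :: a).length - L - b.length = (a.length - L) + 1 by simp; omega]
  rw [List.drop_succ_cons]

lemma sent_no_long_border (a b : List Char) (hsa : pvSep ∉ a) (L : Nat)
    (hbL : b.length < L) (hLN : L < (b ++ pvSep :: a).length)
    (h : (b ++ pvSep :: a).take L = (b ++ pvSep :: a).drop ((b ++ pvSep :: a).length - L)) :
    False := by
  have hlen : (b ++ pvSep :: a).length = b.length + a.length + 1 := by simp; omega
  have hq := congrArg (fun l => l[b.length]?) h
  simp only [List.getElem?_take, List.getElem?_drop, if_pos hbL] at hq
  rw [List.getElem?_append_right (le_refl b.length), Nat.sub_self, List.getElem?_cons_zero] at hq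
  rw [show ((b ++ pvSep :: a).length - L) + b.length
      = b.length + (1 + ((b ++ pvSep :: a).length - L - 1)) by omega,
    List.getElem?_append_right (by omega)] at hq
  rw [show b.length + (1 + ((b ++ pvSep :: a).length - L - 1)) - b.length
      = ((b ++ pvSep :: a).length - L - 1) + 1 by omega, List.getElem?_cons_succ] at hq
  have hlt : (b ++ pvSep :: a).length - L - 1 < a.length := by omega
  rw [List.getElem?_eq_getElem hlt] at hq
  have heq : pvSep = a[(b ++ pvSep :: a).length - L - 1]'hlt := Option.some_injective _ hq
  exact hsa (by rw [heq]; exact List.getElem_mem hlt)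

lemma borders_iff (a b : List Char) (hsa : pvSep ∉ a) (hsb : pvSep ∉ b) (L : Nat) (hL : 0 < L) :
    (L < (b ++ pvSep :: a).length ∧
      (b ++ pvSep :: a).take L <:+ (b ++ pvSep :: a).take (b ++ pvSep :: a).length) ↔
    (L ≤ a.length ∧ PySem.Chars.startswith b (a.drop (a.length - L)) = true) := by
  have hlen : (b ++ pvSep :: a).length = b.length + a.length + 1 := by simp; omega
  rw [List.take_length]
  constructor
  · rintro ⟨hLN, hsuf⟩
    have hlt : ((b ++ pvSep :: a).take L).length = L := by simp; omega
    have hdrop : (b ++ pvSep :: a).take L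
        = (b ++ pvSep :: a).drop ((b ++ pvSep :: a).length - L) := by
      have := List.suffix_iff_eq_drop.mp hsuf
      rwa [hlt] at this
    by_cases hLb : L ≤ b.length
    · by_cases hLa : L ≤ a.length
      · refine ⟨hLa, ?_⟩
        rw [PySem.Chars.startswith_iff]
        have heq : a.drop (a.length - L) = b.take L := by
          rw [← sent_drop a b L hLa, ← hdrop, List.take_append_of_le_length hLb]
        rw [heq]
        exact List.take_prefix L b
      · exfalso
        have hmem : pvSep ∈ (b ++ pvSep :: a).drop ((b ++ pvSep :: a).length - L) := by
          rw [List.drop_append_of_le_length (by omega)]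
          exact List.mem_append_right _ (List.mem_cons_self)
        rw [← hdrop, List.take_append_of_le_length hLb] at hmem
        exact hsb ((List.take_prefix L b).mem hmem)
    · exact absurd hdrop (fun h => sent_no_long_border a b hsa L (by omega) hLN h)
  · rintro ⟨hLa, hsw⟩
    rw [PySem.Chars.startswith_iff] at hsw
    have hlendrop : (a.drop (a.length - L)).length = L := by simp; omega
    have hLb : L ≤ b.length := by
      have := hsw.length_le
      omega
    have heq : a.drop (a.length - L) = b.take L := by
      have := List.prefix_iff_eq_take.mp hsw
      rwa [hlendrop] at this
    refine ⟨by omega, ?_⟩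
    rw [List.suffix_iff_eq_drop]
    rw [show ((b ++ pvSep :: a).take L).length = L by simp; omega]
    rw [List.take_append_of_le_length hLb, ← heq, sent_drop a b L hLa]

lemma MB_eq_OV (a b : List Char) (hsa : pvSep ∉ a) (hsb : pvSep ∉ b) :
    MB (b ++ pvSep :: a) (b ++ pvSep :: a).length = OV a b := by
  set s := b ++ pvSep :: a with hs
  have hN : 0 < s.length := by simp [hs]
  apply Nat.le_antisymm
  · by_cases h : 0 < MB s s.length
    · have hMs := MB_spec s s.length hN
      have := (borders_iff a b hsa hsb (MB s s.length) h).mp hMs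
      exact Nat.le_findGreatest this.1 ⟨h, this.2⟩
    · omega
  · by_cases h : 0 < OV a b
    · have hOs : OV a b ≤ a.length ∧ PySem.Chars.startswith b (a.drop (a.length - OV a b)) = true :=
        ⟨OV_le a b, OV_spec a b h⟩
      have := (borders_iff a b hsa hsb (OV a b) h).mpr hOs
      exact le_MB s s.length (OV a b) this.1 this.2
    · omega

lemma pvOverlap_eq_OV (a b : List Char) (hsa : pvSep ∉ a) (hsb : pvSep ∉ b) :
    pvOverlap a b = OV a b := by
  rcases ha : a with _ | ⟨a0, at'⟩
  · rw [pvOverlap]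
    simp [OV]
  · rcases hb : b with _ | ⟨b0, bt⟩
    · rw [pvOverlap]
      simp only [List.isEmpty_nil, Bool.or_true, if_true]
      symm
      rw [OV, Nat.findGreatest_eq_zero_iff]
      intro n hn1 hn2 hP
      rw [PySem.Chars.startswith_iff] at hP
      have := List.prefix_nil.mp hP.2
      rw [List.drop_eq_nil_iff] at this
      simp at this
      omega
    · rw [← ha, ← hb]
      have ha' : a ≠ [] := by rw [ha]; simp
      have hb' : b ≠ [] := by rw [hb]; simp
      rw [pvOverlap]
      rw [if_neg (by simp [ha', hb', List.isEmpty_iff])]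
      set s := b ++ pvSep :: a with hs
      have hN : 2 ≤ s.length := by
        rw [hs]
        rcases b with _ | ⟨x, xs⟩
        · simp at hb'
        · simp
          omega
      have hfail : (pvFail s).getD (s.length - 1) 0 = MB s ((s.length - 1) + 1) := by
        apply pvFailLoop_getD s (s.length - 1) 1 (List.replicate s.length 0) 0 (by omega) (le_refl _)
          (by simp) (by rw [MB_one])
        · intro j hj
          have : j = 0 := by omega
          subst this
          rw [List.getD_eq_getElem _ _ (by simp; omega)]
          simp [MB_one]
        · omega
      rw [hfail, show (s.length - 1) + 1 = s.length by omega]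
      exact MB_eq_OV a b hsa hsb

-- ---------- the all-same-character test ----------

lemma chars_count_go_single (c : Char) :
    ∀ fuel (l : List Char) acc, l.length ≤ fuel →
      PySem.Chars.count.go [c] fuel l acc = acc + l.count c := by
  intro fuel
  induction fuel with
  | zero =>
    intro l acc hl
    have : l = [] := by
      rcases l with _ | ⟨x, xs⟩
      · rfl
      · simp at hl
    subst this
    simp [PySem.Chars.count.go]
  | succ fuel ih =>
    intro l acc hl
    rcases l with _ | ⟨x, xs⟩
    · simp [PySem.Chars.count.go]
    · rw [PySem.Chars.count.go]
      by_cases hx : c = x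
      · subst hx
        simp only [List.isPrefixOf, Bool.and_true, beq_self_eq_true, if_pos]
        rw [show ([c] : List Char).length = 1 by rfl, List.drop_succ_cons, List.drop_zero]
        rw [ih xs (acc + 1) (by simpa using hl)]
        rw [List.count_cons]
        simp
        omega
      · have hpre : ([c] : List Char).isPrefixOf (x :: xs) = false := by
          simp [List.isPrefixOf]
          exact fun h => (hx h).elim
        rw [hpre]
        simp only [Bool.false_eq_true, if_false]
        rw [ih xs acc (by simpa using hl)]
        rw [List.count_cons]
        simp [show (x == c) = false by simpa using fun h => hx h.symm]
  
lemma chars_count_single (a : List Char) (c : Char) : PySem.Chars.count a [c] = a.count c := by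
  rw [PySem.Chars.count]
  simp only [List.isEmpty_cons, Bool.false_eq_true, if_false]
  rw [chars_count_go_single c a.length a 0 (le_refl _)]
  omega

lemma allsame_iff (a : List Char) (c : Char) :
    (PySem.Chars.count a [c] = a.length) ↔ a = List.replicate a.length c := by
  rw [chars_count_single]
  rw [List.count_eq_length, List.eq_replicate_iff]
  constructor
  · intro h
    exact ⟨rfl, fun b hb => (h b hb).symm⟩
  · intro h b hb
    exact (h.2 b hb).symm

-- ---------- final assembly ----------

lemma sep_not_mem (s : String) (h : pvDomStr s = true) : pvSep ∉ s.toList := by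
  intro hm
  have hc := List.all_eq_true.mp h pvSep hm
  have : pvDomChar pvSep = false := by decide
  rw [this] at hc
  exact Bool.false_ne_true hc

lemma is_there_relation_eq_alt (s1 s2 : String)
    (h1 : pvSep ∉ s1.toList) (h2 : pvSep ∉ s2.toList) :
    is_there_relation s1 s2 = is_there_relation_alt s1 s2 := by
  rw [is_there_relation, is_there_relation_alt]
  set a := s1.toList with hadef
  set b := s2.toList with hbdef
  have ha2 := aScan2_eq b a 0
  rw [Nat.cast_zero] at ha2
  rw [aScan1_eq, ha2, sFirst_eq_OV, sFirst_eq_OV]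
  rw [pvOverlap_eq_OV a b h1 h2, pvOverlap_eq_OV b a h2 h1]
  have hOab := OV_le a b
  have hOba := OV_le b a
  by_cases hpos : 0 < OV a b
  · rw [if_pos hpos]
    by_cases heq : OV a b = a.length
    · have hz : a.length - OV a b = 0 := by omega
      rw [hz]
      have hcond : (0 < OV a b && OV a b == a.length) = true := by
        simp [heq]
        omega
      rw [hcond]
      simp only [if_true]
      by_cases hcnt : PySem.Chars.count a [PySem.List.pyGetD a 0 ' '] = a.length
      · have hrep : a = List.replicate a.length (PySem.List.pyGetD a 0 ' ') :=
          (allsame_iff a _).mp hcnt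
        rw [beq_iff_eq.mpr hcnt, beq_iff_eq.mpr hrep]
        rfl
      · have hrep : a ≠ List.replicate a.length (PySem.List.pyGetD a 0 ' ') := by
          intro hc
          exact hcnt ((allsame_iff a _).mpr hc)
        rw [beq_eq_false_iff_ne.mpr hcnt, beq_eq_false_iff_ne.mpr hrep]
        rfl
    · have hlt : 0 < a.length - OV a b := by omega
      have hcond : (0 < OV a b && OV a b == a.length) = false := by
        simp [heq]
      rw [hcond]
      simp only [Bool.false_eq_true, if_false]
      rcases hd : a.length - OV a b with _ | i
      · omega
      · simp only []
        rw [show a.length - (i + 1) = OV a b by omega]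
        rw [PySem.List.slice_from_natCast b (OV a b)]
        by_cases hpos2 : 0 < OV b a
        · rw [if_pos hpos2, if_pos hpos2, if_pos hpos]
          simp only [Option.map_some, Option.isSome_some, Bool.true_or]
          rw [show b.length - (b.length - OV b a) = OV b a by omega]
          rw [PySem.List.slice_from_natCast a (OV b a)]
        · rw [if_neg hpos2, if_neg hpos2, if_pos hpos]
          simp
  · rw [if_neg hpos, if_neg hpos]
    have hcond : (0 < OV a b && OV a b == a.length) = false := by
      simp only [Bool.and_eq_false_iff]
      left
      simpa using hpos
    rw [hcond]
    simp only [Bool.false_eq_true, if_false]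
    by_cases hpos2 : 0 < OV b a
    · rw [if_pos hpos2, if_pos hpos2]
      simp only [Option.map_some, Option.isSome_some, Option.isSome_none, Bool.false_or]
      rw [show b.length - (b.length - OV b a) = OV b a by omega]
      rw [PySem.List.slice_from_natCast a (OV b a)]
    · rw [if_neg hpos2, if_neg hpos2]
      rfl

-- ===== VERDICT (by name: the statement is the Claim_ definition above) =====
theorem is_there_relation_spec : Claim_equal_is_there_relation := by
  intro s1 s2 hdom
  have hd := Bool.and_eq_true_iff.mp hdom
  show is_there_relation s1 s2 = is_there_relation_alt s1 s2
  exact is_there_relation_eq_alt s1 s2 (sep_not_mem s1 hd.1) (sep_not_mem s2 hd.2)
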